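-- pv_equiv track=rewrite | github.com/derek-olds/code_samples | lightbulbs.py | recursive_bulbs
-- ===== SOURCE A (Python) =====
-- def recursive_bulbs(bit_list, count=0):
--   """This function solves the problem using brute force and recursion. This
--   seems to be an example of a case where you shouldn't use recursion. I estimate  speed and and memory to be O(n!).
--
--   Arguments:
--     bit_list: list, list of ones and zeroes that represent lightbulbs.
--     count: int, the number of times a bit switch has been done. Default is
--            zero. This value should only be used by the recursion logic.
--
--   Returns:
--     count: int, number of opperations needed to switch all bits to one.
--   """
--   if len(bit_list) == 1:
--     if bit_list[0] == 1:
--       return count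
--     else:
--       return count + 1
--   else:
--     for pos, value in enumerate(bit_list):
--       if value == 0:
--         new_bit_list = bit_list[pos:]
--         for new_list_pos, new_value in enumerate(new_bit_list):
--           if new_value == 1:
--             new_bit_list[new_list_pos] = 0
--           else:
--             new_bit_list[new_list_pos] = 1
--         return recursive_bulbs(new_bit_list, count + 1)
--     return count
-- ===== SOURCE B (Python) =====
-- def recursive_bulbs(bit_list, count=0):
--     """Single pass: one flip per run of equal 'is-one' values from the first
--     zero onward, instead of A's repeated flip-the-suffix recursion."""
--     if len(bit_list) == 1:
--         return count if bit_list[0] == 1 else count + 1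
--     try:
--         p = bit_list.index(0)
--     except ValueError:
--         return count
--     ops = count + 1
--     prev = False            # state of the (flipped) suffix: last seen 'is one'?
--     for v in bit_list[p + 1:]:
--         cur = (v == 1)
--         if cur != prev:
--             ops += 1
--             prev = cur
--     return ops
-- ===== Notes on version B (the rewrite author's own statement) =====
-- stated objective: faster
-- what changed: Replaces A's recursion that materialises and flips a whole suffix copy per operation with a single left-to-right pass that, after the first zero, counts one operation per run of equal 'is-one' values.
import Mathlib
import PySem

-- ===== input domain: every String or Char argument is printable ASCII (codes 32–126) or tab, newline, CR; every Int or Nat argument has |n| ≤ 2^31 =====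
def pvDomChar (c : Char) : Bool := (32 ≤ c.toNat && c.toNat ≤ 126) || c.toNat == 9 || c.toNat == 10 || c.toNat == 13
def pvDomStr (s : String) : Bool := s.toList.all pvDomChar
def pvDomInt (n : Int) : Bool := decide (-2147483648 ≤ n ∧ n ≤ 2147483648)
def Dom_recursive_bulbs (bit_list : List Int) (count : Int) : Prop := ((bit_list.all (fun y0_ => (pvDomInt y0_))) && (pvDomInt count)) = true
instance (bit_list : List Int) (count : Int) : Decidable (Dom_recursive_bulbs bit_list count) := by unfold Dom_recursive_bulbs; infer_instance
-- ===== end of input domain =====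

-- B replaces A's recursive flip-the-whole-suffix simulation by a single left-to-right pass
-- counting runs of equal 'is-one' values after the first zero (objective: faster).

-- ===== PORT A =====

-- 'for pos, value in enumerate(bit_list): if value == 0: …' — index of the first zero
def rbFirstZero : List Int → Option Nat
  | [] => none
  | v :: t => if v == 0 then some 0 else (rbFirstZero t).map (· + 1)

-- the inner for-loop: in-place flip of every entry (1 → 0, anything else → 1)
def rbFlip (v : Int) : Int := if v == 1 then 0 else 1

theorem rbFirstZero_lt_length : ∀ {l : List Int} {p : Nat}, rbFirstZero l = some p → p < l.length ∧ l.drop p = 0 :: l.drop (p + 1) := by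
  intro l
  induction l with
  | nil => intro p h; simp [rbFirstZero] at h
  | cons v t ih =>
    intro p h
    simp only [rbFirstZero] at h
    by_cases hv : v = 0
    · simp [hv] at h; subst h; simp [hv]
    · simp [hv] at h
      obtain ⟨q, hq, hpq⟩ := h
      obtain ⟨h1, h2⟩ := ih hq
      subst hpq
      refine ⟨by simpa using Nat.succ_lt_succ h1, by simpa using h2⟩

def recursive_bulbs (bit_list : List Int) (count : Int) : Int :=
  if bit_list.length = 1 then
    if bit_list.headD 0 = 1 then count else count + 1
  else
    match h : rbFirstZero bit_list with
    | none => count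
    | some p => recursive_bulbs ((bit_list.drop p).map rbFlip) (count + 1)
termination_by bit_list.length + (if bit_list.headD 1 = 0 then 1 else 0)
decreasing_by
  obtain ⟨hlt, hdrop⟩ := rbFirstZero_lt_length h
  simp only [List.length_map, List.length_drop]
  have hhead : ((bit_list.drop p).map rbFlip).headD 1 = 1 := by
    rw [hdrop]; simp [rbFlip]
  rw [hhead]
  norm_num
  rcases Nat.eq_zero_or_pos p with hp | hp
  · subst hp
    have hd0 : bit_list.head?.getD 1 = 0 := by
      have hb : bit_list = 0 :: bit_list.drop 1 := by simpa using hdrop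
      rw [hb]; rfl
    rw [if_pos hd0]; omega
  · split <;> omega

-- ===== PORT B =====

-- the 'for v in bit_list[p+1:]' pass of Source B, state (ops, prev)
def rbLoop : List Int → Int → Bool → Int
  | [], ops, _ => ops
  | v :: t, ops, prev =>
    let cur : Bool := v == 1
    if cur ≠ prev then rbLoop t (ops + 1) cur else rbLoop t ops prev

def recursive_bulbs_alt (bit_list : List Int) (count : Int) : Int :=
  if bit_list.length = 1 then
    if bit_list.headD 0 = 1 then count else count + 1
  else
    match PySem.List.index? bit_list 0 with
    | none => count
    | some p => rbLoop (bit_list.drop (p + 1)) (count + 1) false  -- bit_list[p+1:], p+1 ≥ 0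

-- ===== PRECONDITION & SPEC =====
def Spec_recursive_bulbs (bit_list : List Int) (count : Int) (out : Int) : Prop := out = recursive_bulbs_alt bit_list count
instance (bit_list : List Int) (count : Int) (out : Int) : Decidable (Spec_recursive_bulbs bit_list count out) := by unfold Spec_recursive_bulbs; infer_instance

-- ===== CLAIM (what is proved, stated in full; the proofs are below) =====
def Claim_equal_recursive_bulbs : Prop := ∀ (bit_list : List Int) (count : Int), Dom_recursive_bulbs bit_list count → Spec_recursive_bulbs bit_list count (recursive_bulbs bit_list count)

-- ===== LEMMAS AND PROOFS =====

theorem rbFirstZero_cons_ne {v : Int} (hv : v ≠ 0) (l : List Int) :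
    rbFirstZero (v :: l) = (rbFirstZero l).map (· + 1) := by
  simp [rbFirstZero, hv]

-- branch lemmas for A's port (so later proofs never touch the dependent match)
theorem rb_len1 (l : List Int) (k : Int) (h : l.length = 1) :
    recursive_bulbs l k = if l.headD 0 = 1 then k else k + 1 := by
  rw [recursive_bulbs, if_pos h]

theorem rb_none (l : List Int) (k : Int) (h1 : l.length ≠ 1) (h : rbFirstZero l = none) :
    recursive_bulbs l k = k := by
  rw [recursive_bulbs, if_neg h1]
  split <;> simp_all

theorem rb_some (l : List Int) (k : Int) (p : Nat) (h1 : l.length ≠ 1)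
    (h : rbFirstZero l = some p) :
    recursive_bulbs l k = recursive_bulbs ((l.drop p).map rbFlip) (k + 1) := by
  conv_lhs => rw [recursive_bulbs]
  rw [if_neg h1]
  split <;> simp_all

theorem rbFirstZero_eq_index? (l : List Int) : rbFirstZero l = PySem.List.index? l 0 := by
  induction l with
  | nil => simp [rbFirstZero]
  | cons v t ih =>
    by_cases hv : v = 0
    · subst hv; rw [PySem.List.index?_cons_self]; simp [rbFirstZero]
    · rw [PySem.List.index?_cons_of_ne t hv]
      simp [rbFirstZero, hv, ih]

-- the list A recurses on, expressed from the untouched original suffix t and the run state prev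
def rbState (prev : Bool) (t : List Int) : List Int :=
  1 :: t.map (fun v => if (v == 1) = prev then 1 else 0)

theorem rbState_flip (prev : Bool) (t : List Int) :
    (t.map (fun v => if (v == 1) = prev then (1 : Int) else 0)).map rbFlip =
    t.map (fun v => if (v == 1) = !prev then (1 : Int) else 0) := by
  rw [List.map_map]
  apply List.map_congr_left
  intro v _
  cases prev <;> cases hv : (v == 1) <;> simp [rbFlip] <;> simp_all

-- A skips a leading 1 (in front of a nonempty list whose head is 1)
theorem rb_one_cons (m : List Int) (k : Int) (hm : m.headD 0 = 1) (hm' : m ≠ []) :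
    recursive_bulbs (1 :: m) k = recursive_bulbs m k := by
  cases m with
  | nil => exact absurd rfl hm'
  | cons a s =>
    have ha : a = 1 := by simpa using hm
    subst ha
    cases s with
    | nil =>
      rw [rb_none ([1, 1] : List Int) k (by simp) (by simp [rbFirstZero]),
        rb_len1 [1] k (by simp)]
      simp
    | cons w s' =>
      have hfz : rbFirstZero ((1 : Int) :: 1 :: w :: s') =
          (rbFirstZero ((1 : Int) :: w :: s')).map (· + 1) :=
        rbFirstZero_cons_ne (by norm_num) _
      rcases hz : rbFirstZero ((1 : Int) :: w :: s') with _ | q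
      · rw [hz] at hfz
        rw [rb_none _ k (by simp) (by simpa using hfz), rb_none _ k (by simp) hz]
      · rw [hz] at hfz
        rw [rb_some _ k (q + 1) (by simp) (by simpa using hfz),
          rb_some _ k q (by simp) hz]
        rfl

theorem rbState_main : ∀ (t : List Int) (prev : Bool) (k : Int),
    recursive_bulbs (rbState prev t) k = rbLoop t k prev := by
  intro t
  induction t with
  | nil =>
    intro prev k
    rw [show rbState prev [] = [1] from rfl, rb_len1 [1] k (by simp)]
    simp [rbLoop]
  | cons v t ih =>
    intro prev k
    by_cases hc : (v == 1) = prev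
    · -- entry is 1: A skips it, B skips it
      have hlist : rbState prev (v :: t) = 1 :: rbState prev t := by
        simp [rbState, hc]
      rw [hlist, rb_one_cons (rbState prev t) k (by simp [rbState]) (by simp [rbState]), ih]
      simp [rbLoop, hc]
    · -- entry is 0: A flips the suffix here, B counts one op and toggles prev
      have hcur : (v == 1) = !prev := by
        cases hv : (v == 1) <;> cases prev <;> simp_all
      have hzero : rbFirstZero (rbState prev (v :: t)) = some 1 := by
        simp [rbState, rbFirstZero, hc]
      rw [rb_some _ k 1 (by simp [rbState]) hzero]
      have hdrop : ((rbState prev (v :: t)).drop 1).map rbFlip = rbState (!prev) t := by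
        have h0 : ((v == 1) = prev) = False := by simp [hc]
        simp only [rbState, List.drop_one, List.tail_cons, List.map_cons, h0, if_false]
        rw [rbState_flip]
        simp [rbFlip]
      rw [hdrop, ih]
      simp only [rbLoop, hcur]
      cases prev <;> simp

theorem rb_eq_alt (bit_list : List Int) (count : Int) :
    recursive_bulbs bit_list count = recursive_bulbs_alt bit_list count := by
  by_cases h1 : bit_list.length = 1
  · rw [rb_len1 _ _ h1, recursive_bulbs_alt, if_pos h1]
  · rw [recursive_bulbs_alt, if_neg h1]
    rcases h : rbFirstZero bit_list with _ | p
    · rw [rb_none _ _ h1 h, ← rbFirstZero_eq_index?, h]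
    · rw [← rbFirstZero_eq_index?, h]
      obtain ⟨hlt, hdrop⟩ := rbFirstZero_lt_length h
      rw [rb_some _ _ p h1 h, hdrop]
      have : ((0 : Int) :: bit_list.drop (p + 1)).map rbFlip =
          rbState false (bit_list.drop (p + 1)) := by
        simp only [List.map_cons, rbState, List.cons.injEq]
        refine ⟨by simp [rbFlip], ?_⟩
        apply List.map_congr_left
        intro v _
        cases hv : (v == 1) <;> simp [rbFlip, hv]
      rw [this, rbState_main]

-- ===== VERDICT (by name: the statement is the Claim_ definition above) =====
theorem recursive_bulbs_spec : Claim_equal_recursive_bulbs := by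
  intro bit_list count _
  unfold Spec_recursive_bulbs
  exact rb_eq_alt bit_list count
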